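-- pv_equiv track=rewrite | github.com/Nilowk/binary-converter | main.py | decimal_to_signed_binary
-- ===== SOURCE A (Python) =====
-- def decimal_to_signed_binary(decimal):
--     result = [0 for i in range(8)]
--     if decimal < 0:
--         result[0] = 1
--     decimal = abs(decimal)
--     for i in range(7):
--         I = 7 - i
--         result[I] = decimal % 2
--         decimal = decimal // 2
--     return result
-- ===== SOURCE B (Python) =====
-- def decimal_to_signed_binary(decimal):
--     m = abs(decimal) % 128
--     return [1 if decimal < 0 else 0] + [(m // 2**k) & 1 for k in range(6, -1, -1)]
-- ===== Notes on version B (the rewrite author's own statement) =====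
-- stated objective: idiomatic
-- what changed: Replaces the in-place eight-slot array mutated by an iterative halve-and-take-remainder loop with a sign bit prepended to a closed-form per-bit extraction (floor-divide by a power of two, mask the low bit) of the masked magnitude.
import Mathlib
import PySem

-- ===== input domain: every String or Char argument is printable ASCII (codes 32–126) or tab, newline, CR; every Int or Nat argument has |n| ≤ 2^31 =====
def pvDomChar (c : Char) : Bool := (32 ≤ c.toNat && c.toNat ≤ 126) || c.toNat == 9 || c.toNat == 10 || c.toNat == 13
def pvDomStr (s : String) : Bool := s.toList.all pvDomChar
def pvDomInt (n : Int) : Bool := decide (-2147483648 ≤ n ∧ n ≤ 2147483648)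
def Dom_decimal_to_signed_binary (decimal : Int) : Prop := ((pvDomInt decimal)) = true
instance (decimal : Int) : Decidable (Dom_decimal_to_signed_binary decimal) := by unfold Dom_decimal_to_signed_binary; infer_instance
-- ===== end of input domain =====

-- B replaces A's in-place %2 // 2 extraction loop with a sign bit plus a per-bit
-- closed-form comprehension over abs(decimal) % 128 (objective: idiomatic).
-- ===== PORT A =====
def decimal_to_signed_binary (decimal : Int) : List Int :=
  let result : List Int := (List.range 8).map (fun _ => 0)
  let result := if decimal < 0 then result.set 0 1 else result
  let d : Int := |decimal|
  let st := (PySem.List.pyRange 0 7 1).foldl (fun (p : List Int × Int) i =>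
      let I := 7 - i
      (p.1.set I.toNat (PySem.Int.mod p.2 2), PySem.Int.floordiv p.2 2)) (result, d)
  st.1

-- ===== PORT B =====
def decimal_to_signed_binary_alt (decimal : Int) : List Int :=
  let m : Int := PySem.Int.mod |decimal| 128
  [if decimal < 0 then 1 else 0] ++
    (PySem.List.pyRange 6 (-1) (-1)).map
      (fun k => PySem.Int.band (PySem.Int.floordiv m (2 ^ k.toNat)) 1)

-- ===== PRECONDITION & SPEC =====
def Spec_decimal_to_signed_binary (decimal : Int) (out : List Int) : Prop := out = decimal_to_signed_binary_alt decimal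
instance (decimal : Int) (out : List Int) : Decidable (Spec_decimal_to_signed_binary decimal out) := by unfold Spec_decimal_to_signed_binary; infer_instance

-- ===== CLAIM (what is proved, stated in full; the proofs are below) =====
def Claim_equal_decimal_to_signed_binary : Prop := ∀ (decimal : Int), Dom_decimal_to_signed_binary decimal → Spec_decimal_to_signed_binary decimal (decimal_to_signed_binary decimal)

-- ===== LEMMAS AND PROOFS =====

-- ===== VERDICT (by name: the statement is the Claim_ definition above) =====
theorem decimal_to_signed_binary_spec : Claim_equal_decimal_to_signed_binary := by
  intro decimal _
  unfold Spec_decimal_to_signed_binary decimal_to_signed_binary decimal_to_signed_binary_alt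
  have hd : ∀ a : Int, PySem.Int.floordiv a 2 = a / 2 := fun a =>
    PySem.Int.floordiv_eq_ediv_of_pos (by decide)
  have hm : ∀ a : Int, PySem.Int.mod a 2 = a % 2 := fun a =>
    PySem.Int.mod_eq_emod_of_pos (by decide)
  have hp : ∀ a : Int, ∀ n : Nat, PySem.Int.floordiv a (2 ^ n) = a / 2 ^ n := fun a n =>
    PySem.Int.floordiv_eq_ediv_of_pos (by positivity)
  have h128 : ∀ a : Int, PySem.Int.mod a 128 = a % 128 := fun a =>
    PySem.Int.mod_eq_emod_of_pos (by decide)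
  by_cases hneg : decimal < 0 <;>
    simp only [show PySem.List.pyRange 0 7 1 = [0, 1, 2, 3, 4, 5, 6] from by decide,
      show PySem.List.pyRange 6 (-1) (-1) = [6, 5, 4, 3, 2, 1, 0] from by decide,
      show List.range 8 = [0, 1, 2, 3, 4, 5, 6, 7] from by decide,
      hneg, if_true, if_false, List.map, List.foldl, List.set, List.cons_append,
      List.nil_append, PySem.Int.band_one, hd, hm, hp, h128] <;>
  all_goals norm_num [List.set, List.cons.injEq,
    show Int.toNat 7 = 7 from rfl, show Int.toNat 6 = 6 from rfl,
    show Int.toNat 5 = 5 from rfl, show Int.toNat 4 = 4 from rfl,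
    show Int.toNat 3 = 3 from rfl, show Int.toNat 2 = 2 from rfl]
  all_goals
    (obtain ⟨a, ha, -⟩ : ∃ a : Int, |decimal| = a ∧ 0 ≤ a := ⟨|decimal|, rfl, abs_nonneg _⟩
     rw [ha]
     refine ⟨?_, ?_, ?_, ?_, ?_, ?_⟩ <;> omega)
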